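-- pv_equiv track=rewrite | github.com/n-raghu/KnowledgeBase | python/substring.py | get_next_pair
-- ===== SOURCE A (Python) =====
-- in_str = 'abaaaaaabbcbcbacbababababababababababababcccbbbaaa'
--
-- def get_next_pair(start_point, in_str=in_str):
--     nuset = set()
--     for element in in_str[start_point:]:
--         if element in nuset:
--             continue
--         elif len(nuset) == 2:
--             return nuset
--         else:
--             nuset.add(element)
--     return nuset
-- ===== SOURCE B (Python) =====
-- in_str = 'abaaaaaabbcbcbacbababababababababababababcccbbbaaa'
--
-- def get_next_pair(start_point, in_str=in_str):
--     distinct = list(dict.fromkeys(in_str[start_point:]))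
--     return set(distinct[:2])
-- ===== Notes on version B (the rewrite author's own statement) =====
-- stated objective: simpler
-- what changed: Replaced the stateful loop with its in-set/size-2/add branching and early return by a whole-slice order-preserving dedup (dict.fromkeys) followed by taking the first two distinct characters.
import Mathlib
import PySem

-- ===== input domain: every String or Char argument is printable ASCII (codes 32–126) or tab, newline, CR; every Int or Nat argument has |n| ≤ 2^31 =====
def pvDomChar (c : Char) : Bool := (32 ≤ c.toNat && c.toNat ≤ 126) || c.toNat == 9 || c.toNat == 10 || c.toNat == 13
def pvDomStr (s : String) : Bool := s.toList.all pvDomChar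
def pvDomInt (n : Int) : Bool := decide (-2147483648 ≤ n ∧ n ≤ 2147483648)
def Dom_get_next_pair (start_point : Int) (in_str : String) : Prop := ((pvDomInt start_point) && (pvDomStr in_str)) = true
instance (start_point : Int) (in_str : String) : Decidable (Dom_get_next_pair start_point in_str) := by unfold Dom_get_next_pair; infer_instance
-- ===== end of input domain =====

-- B replaces A's early-exit loop with set/branch state by dedup-then-take-2; objective: simpler.


-- ===== PORT A =====
-- A's loop over the characters of in_str[start_point:], with the early 'return nuset'
-- when a third distinct character is met.
def gnpLoop : List Char → PySem.Set String → PySem.Set String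
  | [], nuset => nuset
  | c :: rest, nuset =>
      if PySem.Set.contains nuset (String.ofList [c]) then gnpLoop rest nuset
      else if PySem.Set.len nuset == 2 then nuset
      else gnpLoop rest (PySem.Set.add nuset (String.ofList [c]))

def get_next_pair (start_point : Int) (in_str : String) : List String :=
  gnpLoop (PySem.List.slice in_str.toList (some start_point) none) PySem.Set.empty

-- ===== PORT B =====
def get_next_pair_alt (start_point : Int) (in_str : String) : List String :=
  PySem.Set.ofList
    ((PySem.List.dedup
        ((PySem.List.slice in_str.toList (some start_point) none).map (fun c => String.ofList [c]))).take 2)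

-- ===== PRECONDITION & SPEC =====
def Spec_get_next_pair (start_point : Int) (in_str : String) (out : List String) : Prop := out = get_next_pair_alt start_point in_str
instance (start_point : Int) (in_str : String) (out : List String) : Decidable (Spec_get_next_pair start_point in_str out) := by unfold Spec_get_next_pair; infer_instance

-- ===== CLAIM (what is proved, stated in full; the proofs are below) =====
def Claim_equal_get_next_pair : Prop := ∀ (start_point : Int) (in_str : String), Dom_get_next_pair start_point in_str → Spec_get_next_pair start_point in_str (get_next_pair start_point in_str)

-- ===== LEMMAS AND PROOFS =====

-- Set.add over a list only appends elements at the end.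
lemma foldl_add_append (l : List String) (s : PySem.Set String) :
    ∃ t, l.foldl PySem.Set.add s = s ++ t := by
  induction l generalizing s with
  | nil => exact ⟨[], by simp⟩
  | cons x xs ih =>
      simp only [List.foldl_cons]
      by_cases hx : x ∈ s
      · rw [PySem.Set.add_of_mem hx]; exact ih s
      · rw [PySem.Set.add_of_not_mem hx]
        obtain ⟨t, ht⟩ := ih (s ++ [x])
        exact ⟨[x] ++ t, by simpa using ht⟩

-- A's early-exit loop returns the first two (distinct) elements of the full fold.
lemma gnpLoop_eq (cs : List Char) (s : PySem.Set String) (hlen : s.length ≤ 2) :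
    gnpLoop cs s = (cs.foldl (fun a c => PySem.Set.add a (String.ofList [c])) s).take 2 := by
  induction cs generalizing s with
  | nil =>
      simp [gnpLoop, List.take_of_length_le hlen]
  | cons c rest ih =>
      simp only [gnpLoop, List.foldl_cons]
      by_cases hc : String.ofList [c] ∈ s
      · rw [if_pos (by simpa [PySem.Set.contains_iff] using hc),
            PySem.Set.add_of_mem hc]
        exact ih s hlen
      · rw [if_neg (by simpa [PySem.Set.contains_iff] using hc)]
        by_cases h2 : s.length = 2
        · rw [if_pos (by simp [PySem.Set.len]; omega)]
          rw [PySem.Set.add_of_not_mem hc]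
          rw [show (rest.foldl (fun a c => PySem.Set.add a (String.ofList [c])) (s ++ [String.ofList [c]]))
                = (rest.map (fun c => String.ofList [c])).foldl PySem.Set.add (s ++ [String.ofList [c]]) by
                rw [List.foldl_map]]
          obtain ⟨t, ht⟩ := foldl_add_append (rest.map (fun c => String.ofList [c])) (s ++ [String.ofList [c]])
          rw [ht, List.append_assoc, List.take_append_of_le_length (by omega),
              List.take_of_length_le (by omega)]
        · rw [if_neg (by simp [PySem.Set.len]; omega)]
          rw [PySem.Set.add_of_not_mem hc]
          exact ih (s ++ [String.ofList [c]]) (by simp; omega)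

theorem get_next_pair_spec : Claim_equal_get_next_pair := by
  intro sp s _
  show get_next_pair sp s = get_next_pair_alt sp s
  unfold get_next_pair get_next_pair_alt
  rw [gnpLoop_eq _ _ (by simp [PySem.Set.empty]), PySem.List.dedup_eq_ofList]
  have h1 : (PySem.List.slice s.toList (some sp) none).foldl
        (fun a c => PySem.Set.add a (String.ofList [c])) PySem.Set.empty
      = PySem.Set.ofList ((PySem.List.slice s.toList (some sp) none).map (fun c => String.ofList [c])) := by
    rw [PySem.Set.ofList_eq_foldl, List.foldl_map]; rfl
  have h2 := PySem.Set.ofList_eq_self_of_nodup _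
      ((PySem.Set.nodup_ofList
          ((PySem.List.slice s.toList (some sp) none).map (fun c => String.ofList [c]))).sublist
        (List.take_sublist 2 _))
  rw [h1, h2]
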